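-- pv_equiv track=rewrite | github.com/Dingzhen778/Swebench_in_Siflow | eval/apply_agentless.py | split_edit_multifile_commands
-- ===== SOURCE A (Python) =====
-- from collections import OrderedDict
--
-- def split_edit_multifile_commands(commands):
--     """拆分多文件编辑命令"""
--     file_to_commands = OrderedDict()
--
--     for command in commands:
--         file_name = None
--         for subcommand in command.split(">>>>>>> REPLACE")[:-1]:
--             subcommand = subcommand.strip()
--             if "<<<<<<< SEARCH" in subcommand:
--                 fn = subcommand.split("<<<<<<< SEARCH")[0].lstrip("#").strip()
--                 if fn:
--                     file_name = fn.strip("'\"")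
--
--             if len(subcommand.split("<<<<<<< SEARCH")) != 2:
--                 continue
--
--             converted_command = (
--                 "<<<<<<< SEARCH"
--                 + subcommand.split("<<<<<<< SEARCH")[1]
--                 + "\n"
--                 + ">>>>>>> REPLACE"
--             )
--
--             if file_name not in file_to_commands or converted_command not in file_to_commands.get(file_name, []):
--                 file_to_commands.setdefault(file_name, []).append(converted_command)
--
--     return file_to_commands
-- ===== SOURCE B (Python) =====
-- from collections import OrderedDict
--
-- def split_edit_multifile_commands(commands):
--     """拆分多文件编辑命令 (two-pass: flatten to (file, command) pairs, then group/dedup)"""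
--     pairs = []
--     for command in commands:
--         file_name = None
--         for subcommand in command.split(">>>>>>> REPLACE")[:-1]:
--             subcommand = subcommand.strip()
--             pieces = subcommand.split("<<<<<<< SEARCH")
--             if "<<<<<<< SEARCH" in subcommand:
--                 fn = pieces[0].lstrip("#").strip()
--                 if fn:
--                     file_name = fn.strip("'\"")
--             if len(pieces) == 2:
--                 pairs.append((file_name,
--                               "<<<<<<< SEARCH" + pieces[1] + "\n" + ">>>>>>> REPLACE"))
--     result = OrderedDict()
--     for fn in dict.fromkeys(f for f, _ in pairs):
--         result[fn] = list(dict.fromkeys(c for f, c in pairs if f == fn))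
--     return result
-- ===== Notes on version B (the rewrite author's own statement) =====
-- stated objective: alternative
-- what changed: A interleaves parsing with conditional OrderedDict updates in one nested loop; B first flattens all commands into a flat (file_name, converted_command) pair list, then a separate group-by pass builds the dict, deduping per file with dict.fromkeys.
import Mathlib
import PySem

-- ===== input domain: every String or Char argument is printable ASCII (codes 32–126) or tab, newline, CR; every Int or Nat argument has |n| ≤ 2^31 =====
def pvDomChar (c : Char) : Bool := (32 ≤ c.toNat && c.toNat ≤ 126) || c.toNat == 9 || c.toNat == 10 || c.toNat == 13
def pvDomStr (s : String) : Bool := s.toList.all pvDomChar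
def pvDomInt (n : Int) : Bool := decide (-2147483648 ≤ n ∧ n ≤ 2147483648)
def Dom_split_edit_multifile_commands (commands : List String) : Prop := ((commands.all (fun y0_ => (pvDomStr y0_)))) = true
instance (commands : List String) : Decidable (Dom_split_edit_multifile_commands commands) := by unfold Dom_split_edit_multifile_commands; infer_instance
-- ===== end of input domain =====

-- B re-implements A by a different decomposition: one pass flattens the commands to a flat
-- (file, command) pair list, a separate group-by pass with ordered dedup builds the dict
-- (A interleaves parsing with conditional dict updates). Objective: alternative decomposition.


-- ===== PORT A =====
-- shared primitives (both Pythons use the same library calls)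
-- exact port of str.lstrip(chars): drop leading characters that occur in chars
def pyLstripChars (s : String) (chars : List Char) : String :=
  String.ofList (s.toList.dropWhile (fun c => chars.contains c))

-- s.split(sep) for the nonempty separator literals used here (split? = some for sep ≠ "")
def pySplit (s sep : String) : List String :=
  (PySem.Str.split? s sep).getD []

-- the file_name update both Pythons perform on one stripped subcommand
def pvNewFile (cur : Option String) (sub : String) (pieces : List String) : Option String :=
  if PySem.Str.isIn "<<<<<<< SEARCH" sub then
    let fn := PySem.Str.strip (pyLstripChars (pieces.headD "") ['#'])
    if fn ≠ "" then some (PySem.Str.stripChars fn "'\"") else cur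
  else cur

-- A's conditional dict update: `if fn not in d or conv not in d.get(fn, []): d.setdefault(fn, []).append(conv)`
def pvDictAdd (d : PySem.Dict (Option String) (List String)) (p : Option String × String) :
    PySem.Dict (Option String) (List String) :=
  if !(d.contains p.1) || !((d.getD p.1 []).contains p.2) then
    d.modify p.1 [] (fun l => l ++ [p.2])
  else d

-- A's inner-loop body: state = (file_name, file_to_commands)
def pvSubA (st : Option String × PySem.Dict (Option String) (List String)) (sub0 : String) :
    Option String × PySem.Dict (Option String) (List String) :=
  let sub := PySem.Str.strip sub0
  let pieces := pySplit sub "<<<<<<< SEARCH"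
  let fileName := pvNewFile st.1 sub pieces
  if pieces.length ≠ 2 then (fileName, st.2)
  else
    (fileName, pvDictAdd st.2 (fileName, "<<<<<<< SEARCH" ++ pieces.getD 1 "" ++ "\n" ++ ">>>>>>> REPLACE"))

-- A's outer-loop body: process one command (file_name reset to None)
def pvCmdA (d : PySem.Dict (Option String) (List String)) (command : String) :
    PySem.Dict (Option String) (List String) :=
  ((PySem.List.slice (pySplit command ">>>>>>> REPLACE") none (some (-1))).foldl pvSubA (none, d)).2

def split_edit_multifile_commands (commands : List String) : List (Option String × List String) :=
  (commands.foldl pvCmdA PySem.Dict.empty).items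

-- ===== PORT B =====
-- B's inner-loop body: state = (file_name, flat pair list)
def pvSubB (st : Option String × List (Option String × String)) (sub0 : String) :
    Option String × List (Option String × String) :=
  let sub := PySem.Str.strip sub0
  let pieces := pySplit sub "<<<<<<< SEARCH"
  let fileName := pvNewFile st.1 sub pieces
  if pieces.length = 2 then
    (fileName, st.2 ++ [(fileName, "<<<<<<< SEARCH" ++ pieces.getD 1 "" ++ "\n" ++ ">>>>>>> REPLACE")])
  else (fileName, st.2)

def pvCmdB (acc : List (Option String × String)) (command : String) :
    List (Option String × String) :=
  ((PySem.List.slice (pySplit command ">>>>>>> REPLACE") none (some (-1))).foldl pvSubB (none, acc)).2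

def split_edit_multifile_commands_alt (commands : List String) : List (Option String × List String) :=
  let pairs := commands.foldl pvCmdB []
  ((PySem.List.dedup (pairs.map Prod.fst)).foldl
      (fun r k => r.insert k (PySem.List.dedup ((pairs.filter (fun p => p.1 == k)).map Prod.snd)))
      PySem.Dict.empty).items

-- ===== PRECONDITION & SPEC =====
def Spec_split_edit_multifile_commands (commands : List String) (out : List (Option String × List String)) : Prop := out = split_edit_multifile_commands_alt commands
instance (commands : List String) (out : List (Option String × List String)) : Decidable (Spec_split_edit_multifile_commands commands out) := by unfold Spec_split_edit_multifile_commands; infer_instance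

-- ===== CLAIM (what is proved, stated in full; the proofs are below) =====
def Claim_equal_split_edit_multifile_commands : Prop := ∀ (commands : List String), Dom_split_edit_multifile_commands commands → Spec_split_edit_multifile_commands commands (split_edit_multifile_commands commands)

-- ===== LEMMAS AND PROOFS =====

-- B's flatten step only appends: pulling the accumulator out front
lemma pvSubB_acc (fn : Option String) (acc : List (Option String × String)) (s : String) :
    pvSubB (fn, acc) s = ((pvSubB (fn, []) s).1, acc ++ (pvSubB (fn, []) s).2) := by
  simp only [pvSubB]
  split <;> simp

lemma flat_acc (subs : List String) :
    ∀ (fn : Option String) (acc : List (Option String × String)),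
      List.foldl pvSubB (fn, acc) subs
        = ((List.foldl pvSubB (fn, []) subs).1, acc ++ (List.foldl pvSubB (fn, []) subs).2) := by
  induction subs with
  | nil => intro fn acc; simp
  | cons s rest ih =>
    intro fn acc
    simp only [List.foldl_cons]
    rw [pvSubB_acc fn acc s, pvSubB_acc fn [] s, ih, ih ((pvSubB (fn, []) s).1) ([] ++ _)]
    simp

lemma flat_single (subs : List String) (fn : Option String) (p : Option String × String) :
    List.foldl pvSubB (fn, [p]) subs
      = ((List.foldl pvSubB (fn, []) subs).1, p :: (List.foldl pvSubB (fn, []) subs).2) := by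
  rw [flat_acc subs fn [p]]
  simp

-- bridge: A's interleaved inner loop = flatten (B) then fold the dict update over the pairs
lemma innerA_eq (subs : List String) :
    ∀ (fn : Option String) (d : PySem.Dict (Option String) (List String)),
      List.foldl pvSubA (fn, d) subs
        = ((List.foldl pvSubB (fn, []) subs).1,
           List.foldl pvDictAdd d (List.foldl pvSubB (fn, []) subs).2) := by
  induction subs with
  | nil => intro fn d; simp
  | cons s rest ih =>
    intro fn d
    simp only [List.foldl_cons, pvSubA, pvSubB]
    by_cases h : (pySplit (PySem.Str.strip s) "<<<<<<< SEARCH").length = 2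
    · rw [if_neg (not_not_intro h), if_pos h, List.nil_append, ih, flat_single]
      simp
    · rw [if_pos h, if_neg h, ih]

lemma pvCmdB_acc (acc : List (Option String × String)) (c : String) :
    pvCmdB acc c = acc ++ pvCmdB [] c := by
  simp only [pvCmdB]
  rw [flat_acc]

lemma cmds_acc (cs : List String) :
    ∀ acc, List.foldl pvCmdB acc cs = acc ++ List.foldl pvCmdB [] cs := by
  induction cs with
  | nil => intro acc; simp
  | cons c cs ih =>
    intro acc
    simp only [List.foldl_cons]
    rw [ih, pvCmdB_acc, ih (pvCmdB [] c)]
    simp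

-- bridge: A's whole loop = fold the dict update over B's flat pair list
lemma outer_eq (commands : List String) :
    ∀ d, List.foldl pvCmdA d commands
        = List.foldl pvDictAdd d (List.foldl pvCmdB [] commands) := by
  induction commands with
  | nil => intro d; simp
  | cons c cs ih =>
    intro d
    simp only [List.foldl_cons]
    rw [ih, cmds_acc cs (pvCmdB [] c), List.foldl_append]
    congr 1
    simp only [pvCmdA, pvCmdB]
    rw [innerA_eq]

-- keys of one conditional update = ordered set add
lemma keys_dictAdd (d : PySem.Dict (Option String) (List String)) (p : Option String × String) :
    (pvDictAdd d p).keys = PySem.Set.add d.keys p.1 := by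
  unfold pvDictAdd
  by_cases hc : d.contains p.1
  · have hmem : p.1 ∈ d.keys := (PySem.Dict.contains_iff_mem_keys d p.1).mp hc
    split
    · rw [PySem.Dict.keys_modify, PySem.Dict.keys_insert_of_contains _ _ hc]
      simp [PySem.Set.add, PySem.Set.contains, hmem]
    · simp [PySem.Set.add, PySem.Set.contains, hmem]
  · have hcf : d.contains p.1 = false := by simpa using hc
    have hmem : p.1 ∉ d.keys := fun hm => hc ((PySem.Dict.contains_iff_mem_keys d p.1).mpr hm)
    rw [if_pos (by simp [hcf]), PySem.Dict.keys_modify,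
        PySem.Dict.keys_insert_of_not_contains _ _ hcf]
    simp [PySem.Set.add, PySem.Set.contains, hmem]

lemma keys_fold (pairs : List (Option String × String)) :
    ∀ d, (List.foldl pvDictAdd d pairs).keys
        = List.foldl PySem.Set.add d.keys (pairs.map Prod.fst) := by
  induction pairs with
  | nil => intro d; simp
  | cons p ps ih =>
    intro d
    simp only [List.foldl_cons, List.map_cons]
    rw [ih, keys_dictAdd]

-- value at one key after one conditional update = ordered set add on the value list
lemma getD_dictAdd (d : PySem.Dict (Option String) (List String)) (p : Option String × String)
    (c : Option String) :
    (pvDictAdd d p).getD c []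
      = if p.1 = c then PySem.Set.add (d.getD c []) p.2 else d.getD c [] := by
  unfold pvDictAdd
  by_cases h : (!(d.contains p.1) || !((d.getD p.1 []).contains p.2)) = true
  · rw [if_pos h, PySem.Dict.getD_modify]
    by_cases hpc : p.1 = c
    · subst hpc
      have hnc : List.contains (d.getD p.1 []) p.2 = false := by
        rcases (by simpa using h : d.contains p.1 = false ∨ (d.getD p.1 []).contains p.2 = false)
            with h1 | h2
        · rw [PySem.Dict.getD_of_not_contains _ _ h1]; simp
        · exact h2
      simp only [PySem.Set.add, PySem.Set.contains, hnc]
      simp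
    · rw [if_neg hpc, if_neg (fun hh => hpc hh.symm)]
  · rw [if_neg h]
    have h2 : List.contains (d.getD p.1 []) p.2 = true := by
      have := (by simpa using h : d.contains p.1 = true ∧ (d.getD p.1 []).contains p.2 = true)
      exact this.2
    by_cases hpc : p.1 = c
    · subst hpc
      simp only [PySem.Set.add, PySem.Set.contains, h2]
      simp
    · rw [if_neg hpc]

lemma getD_fold (pairs : List (Option String × String)) :
    ∀ (d : PySem.Dict (Option String) (List String)) (c : Option String),
      (List.foldl pvDictAdd d pairs).getD c []
        = List.foldl PySem.Set.add (d.getD c [])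
            ((pairs.filter (fun p => p.1 == c)).map Prod.snd) := by
  induction pairs with
  | nil => intro d c; simp
  | cons p ps ih =>
    intro d c
    simp only [List.foldl_cons]
    by_cases hpc : p.1 = c
    · rw [ih, getD_dictAdd, if_pos hpc]
      have hb : (p.1 == c) = true := by simp [hpc]
      simp [hb]
    · rw [ih, getD_dictAdd, if_neg hpc]
      have hb : (p.1 == c) = false := by simp [hpc]
      simp [hb]

-- dedup is exactly the ordered-set fold
lemma dedup_eq_fold {α : Type} [BEq α] (xs : List α) :
    PySem.List.dedup xs = List.foldl PySem.Set.add [] xs := rfl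

-- ===== VERDICT (by name: the statement is the Claim_ definition above) =====
theorem split_edit_multifile_commands_spec : Claim_equal_split_edit_multifile_commands := by
  intro commands _
  unfold Spec_split_edit_multifile_commands split_edit_multifile_commands split_edit_multifile_commands_alt
  set pairs := commands.foldl pvCmdB [] with hpairs
  rw [outer_eq]
  have hkeys : (List.foldl pvDictAdd PySem.Dict.empty pairs).keys
      = PySem.List.dedup (pairs.map Prod.fst) := by
    rw [keys_fold, dedup_eq_fold]
    simp [PySem.Dict.keys_empty]
  have hnodup : (List.foldl pvDictAdd PySem.Dict.empty pairs).keys.Nodup := by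
    rw [hkeys]; exact PySem.List.nodup_dedup _
  rw [PySem.Dict.items_eq_map_keys _ hnodup ([] : List String), hkeys]
  rw [PySem.Dict.items_foldl_insert_fresh _ (fun a => a) _ _
        (by intro a _; simp [PySem.Dict.contains_empty])
        (by simpa using PySem.List.nodup_dedup (pairs.map Prod.fst))]
  simp only [show (PySem.Dict.empty : PySem.Dict (Option String) (List String)).items = [] from rfl, List.nil_append]
  apply List.map_congr_left
  intro k _
  rw [getD_fold, dedup_eq_fold]
  simp [PySem.Dict.getD_empty]
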